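-- pv_equiv track=rewrite | github.com/musicsms/generate-keypair | src/services/csr_validation_service.py | get_formatted_subject_display
-- ===== SOURCE A (Python) =====
-- from typing import Dict, Any, List, Optional, Tuple
--
-- def get_formatted_subject_display(subject_info: Dict[str, Any]) -> List[Tuple[str, str]]:
--     """
--     Format the subject information for display
--
--     Args:
--         subject_info: Dictionary of subject information
--
--     Returns:
--         List of tuples with formatted field names and values
--     """
--     display_names = {
--         "common_name": "Common Name (CN)",
--         "country": "Country (C)",
--         "state": "State/Province (ST)",
--         "locality": "Locality (L)",
--         "organization": "Organization (O)",
--         "organizational_unit": "Organizational Unit (OU)",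
--         "email_address": "Email Address",
--         "domain_component": "Domain Component (DC)",
--         "surname": "Surname",
--         "given_name": "Given Name",
--         "title": "Title",
--         "serial_number": "Serial Number",
--         "pseudonym": "Pseudonym",
--         "generation_qualifier": "Generation Qualifier",
--     }
--
--     result = []
--
--     # First add the standard fields in a specific order if they exist
--     priority_fields = [
--         "common_name", "email_address", "organization", "organizational_unit",
--         "locality", "state", "country"
--     ]
--
--     for field in priority_fields:
--         if field in subject_info:
--             display_name = display_names.get(field, field)
--             result.append((display_name, subject_info[field]))
--
--     # Then add any remaining fields
--     for field, value in subject_info.items():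
--         if field not in priority_fields:
--             display_name = display_names.get(field, field)
--             result.append((display_name, value))
--
--     return result
-- ===== SOURCE B (Python) =====
-- from typing import Dict, Any, List, Tuple
--
--
-- def get_formatted_subject_display(subject_info: Dict[str, Any]) -> List[Tuple[str, str]]:
--     """Single stable sort by a priority index instead of two passes over the dict."""
--     display_names = {
--         "common_name": "Common Name (CN)",
--         "country": "Country (C)",
--         "state": "State/Province (ST)",
--         "locality": "Locality (L)",
--         "organization": "Organization (O)",
--         "organizational_unit": "Organizational Unit (OU)",
--         "email_address": "Email Address",
--         "domain_component": "Domain Component (DC)",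
--         "surname": "Surname",
--         "given_name": "Given Name",
--         "title": "Title",
--         "serial_number": "Serial Number",
--         "pseudonym": "Pseudonym",
--         "generation_qualifier": "Generation Qualifier",
--     }
--
--     priority_index = {field: i for i, field in enumerate([
--         "common_name", "email_address", "organization", "organizational_unit",
--         "locality", "state", "country",
--     ])}
--
--     # Stable sort: priority fields first in their fixed order (indices 0-6),
--     # everything else keeps dict insertion order under the tie key 7.
--     ordered = sorted(subject_info.items(), key=lambda kv: priority_index.get(kv[0], 7))
--     return [(display_names.get(field, field), value) for field, value in ordered]
-- ===== Notes on version B (the rewrite author's own statement) =====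
-- stated objective: idiomatic
-- what changed: Replaces A's two passes (a scan over the priority list with dict lookups, then a re-scan of all items filtering out priority fields) by one stable sort of the items under a priority-index key followed by a single formatting comprehension.
import Mathlib
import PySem

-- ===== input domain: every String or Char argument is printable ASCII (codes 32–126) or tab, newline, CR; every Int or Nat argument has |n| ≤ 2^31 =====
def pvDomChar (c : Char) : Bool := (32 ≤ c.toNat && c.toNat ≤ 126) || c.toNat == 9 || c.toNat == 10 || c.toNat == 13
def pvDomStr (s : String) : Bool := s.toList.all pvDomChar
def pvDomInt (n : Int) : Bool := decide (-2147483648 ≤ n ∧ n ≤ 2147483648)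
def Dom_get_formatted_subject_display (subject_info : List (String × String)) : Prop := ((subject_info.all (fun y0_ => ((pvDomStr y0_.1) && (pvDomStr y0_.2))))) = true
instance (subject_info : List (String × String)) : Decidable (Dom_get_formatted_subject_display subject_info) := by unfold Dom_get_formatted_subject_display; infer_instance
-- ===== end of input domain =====

-- B replaces A's two passes (priority scan with dict lookups + filtered re-scan of the items)
-- by ONE stable sort of the items under a priority-index key followed by a formatting map
-- (objective: idiomatic; same results on every input).

-- the display_names dict literal both Pythons build
def pvDisplayNames : PySem.Dict String String := PySem.Dict.ofList [
  ("common_name", "Common Name (CN)"),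
  ("country", "Country (C)"),
  ("state", "State/Province (ST)"),
  ("locality", "Locality (L)"),
  ("organization", "Organization (O)"),
  ("organizational_unit", "Organizational Unit (OU)"),
  ("email_address", "Email Address"),
  ("domain_component", "Domain Component (DC)"),
  ("surname", "Surname"),
  ("given_name", "Given Name"),
  ("title", "Title"),
  ("serial_number", "Serial Number"),
  ("pseudonym", "Pseudonym"),
  ("generation_qualifier", "Generation Qualifier")]

-- ===== PORT A =====
-- 'if field in subject_info: … subject_info[field]' is ported as one match on get?
-- (exact: Python's 'field in d' holds iff get? is some, and the subscript then yields that value).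
def get_formatted_subject_display (subject_info : List (String × String)) : List (String × String) :=
  let d : PySem.Dict String String := PySem.Dict.ofList subject_info
  let priority_fields : List String :=
    ["common_name", "email_address", "organization", "organizational_unit",
     "locality", "state", "country"]
  let result : List (String × String) := priority_fields.foldl (fun acc field =>
    match d.get? field with
    | some v => acc ++ [(pvDisplayNames.getD field field, v)]
    | none => acc) []
  d.items.foldl (fun acc kv =>
    if kv.1 ∉ priority_fields then acc ++ [(pvDisplayNames.getD kv.1 kv.1, kv.2)]
    else acc) result

-- ===== PORT B =====
-- the dict comprehension {field: i for i, field in enumerate([...])}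
def pvPriorityIndex : PySem.Dict String Int :=
  PySem.Dict.ofList ((PySem.List.enumerate
    ["common_name", "email_address", "organization", "organizational_unit",
     "locality", "state", "country"]).map (fun p => (p.2, p.1)))

def get_formatted_subject_display_alt (subject_info : List (String × String)) : List (String × String) :=
  let d : PySem.Dict String String := PySem.Dict.ofList subject_info
  let ordered := PySem.List.sorted d.items (fun kv => pvPriorityIndex.getD kv.1 7)
  ordered.map (fun kv => (pvDisplayNames.getD kv.1 kv.1, kv.2))

-- ===== PRECONDITION & SPEC =====
def Spec_get_formatted_subject_display (subject_info : List (String × String)) (out : List (String × String)) : Prop := out = get_formatted_subject_display_alt subject_info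
instance (subject_info : List (String × String)) (out : List (String × String)) : Decidable (Spec_get_formatted_subject_display subject_info out) := by unfold Spec_get_formatted_subject_display; infer_instance

-- ===== CLAIM (what is proved, stated in full; the proofs are below) =====
def Claim_equal_get_formatted_subject_display : Prop := ∀ (subject_info : List (String × String)), Dom_get_formatted_subject_display subject_info → Spec_get_formatted_subject_display subject_info (get_formatted_subject_display subject_info)

-- ===== LEMMAS AND PROOFS =====

-- inserting past a prefix none of which compares after x
theorem pv_insertBy_append_left {α : Type} (before : α → α → Bool) (x : α)
    (pre post : List α) (h : ∀ y ∈ pre, before x y = false) :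
    PySem.List.insertBy before x (pre ++ post) = pre ++ PySem.List.insertBy before x post := by
  induction pre with
  | nil => simp
  | cons a t ih =>
    simp only [List.cons_append, PySem.List.insertBy, h a (by simp)]
    simp [ih (fun y hy => h y (by simp [hy]))]

-- inserting before a suffix all of which compares after x
theorem pv_insertBy_all_before {α : Type} (before : α → α → Bool) (x : α)
    (zs : List α) (h : ∀ y ∈ zs, before x y = true) :
    PySem.List.insertBy before x zs = x :: zs := by
  cases zs with
  | nil => rfl
  | cons a t => simp [PySem.List.insertBy, h a (by simp)]

-- appending an element whose key is in none of the buckets changes no bucket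
theorem pv_flatMap_filter_drop {α : Type} (key : α → Int) (l : List α) (x : α) :
    ∀ ks : List Int, (∀ i ∈ ks, ¬ key x = i) →
      ks.flatMap (fun i => (l ++ [x]).filter (fun a => key a == i)) =
        ks.flatMap (fun i => l.filter (fun a => key a == i)) := by
  intro ks h
  induction ks with
  | nil => rfl
  | cons k ks' ih =>
    have hx : List.filter (fun a => key a == k) [x] = [] := by
      simp [h k (by simp)]
    rw [List.flatMap_cons, List.flatMap_cons, List.filter_append, hx, List.append_nil,
        ih (fun i hi => h i (List.mem_cons_of_mem _ hi))]

-- a stable sort whose key takes values in a strictly increasing list ks is the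
-- concatenation of the key-buckets, each in original order
theorem pv_sorted_eq_flatMap_filter {α : Type} (key : α → Int) (ks : List Int)
    (hks : ks.Pairwise (· < ·)) :
    ∀ l : List α, (∀ a ∈ l, key a ∈ ks) →
      PySem.List.sorted l key = ks.flatMap (fun i => l.filter (fun a => key a == i)) := by
  intro l
  induction l using List.reverseRecOn with
  | nil => rw [PySem.List.sorted_eq_foldl_insertBy]; simp
  | append_singleton l x ih =>
    intro h
    have hx : key x ∈ ks := h x (by simp)
    obtain ⟨s, t, rfl⟩ := List.append_of_mem hx
    have hst := (List.pairwise_append.mp hks)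
    have hs_lt : ∀ i ∈ s, i < key x := fun i hi => hst.2.2 i hi (key x) (by simp)
    have ht_gt : ∀ j ∈ t, key x < j := by
      have := hst.2.1
      simp only [List.pairwise_cons] at this
      exact this.1
    have hl : ∀ a ∈ l, key a ∈ s ++ key x :: t := fun a ha => h a (by simp [ha])
    rw [PySem.List.sorted_eq_foldl_insertBy, List.foldl_append]
    simp only [List.foldl_cons, List.foldl_nil]
    rw [← PySem.List.sorted_eq_foldl_insertBy, ih hl]
    have hsplit : (s ++ key x :: t).flatMap (fun i => l.filter (fun a => key a == i))
        = (s.flatMap (fun i => l.filter (fun a => key a == i)) ++ l.filter (fun a => key a == key x))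
          ++ t.flatMap (fun i => l.filter (fun a => key a == i)) := by
      simp [List.flatMap_append]
    rw [hsplit]
    rw [pv_insertBy_append_left _ x _ _ (by
      intro y hy
      simp only [List.mem_append, List.mem_flatMap, List.mem_filter, beq_iff_eq] at hy
      simp only [decide_eq_false_iff_not, not_lt]
      rcases hy with ⟨i, hi, _, hkey⟩ | ⟨_, hkey⟩
      · rw [hkey]; exact (hs_lt i hi).le
      · rw [hkey])]
    rw [pv_insertBy_all_before _ x _ (by
      intro y hy
      simp only [List.mem_flatMap, List.mem_filter, beq_iff_eq] at hy
      obtain ⟨j, hj, _, hkey⟩ := hy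
      simp [hkey, ht_gt j hj])]
    rw [List.flatMap_append, List.flatMap_cons]
    rw [pv_flatMap_filter_drop key l x s (fun i hi => (hs_lt i hi).ne'),
        pv_flatMap_filter_drop key l x t (fun j hj => (ht_gt j hj).ne)]
    have hFx : (l ++ [x]).filter (fun a => key a == key x)
        = l.filter (fun a => key a == key x) ++ [x] := by
      simp [List.filter_append]
    rw [hFx]
    simp

-- closed evaluation of B's sort key
theorem pv_key_eval (s : String) :
    pvPriorityIndex.getD s 7 =
      if s = "common_name" then 0 else if s = "email_address" then 1
      else if s = "organization" then 2 else if s = "organizational_unit" then 3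
      else if s = "locality" then 4 else if s = "state" then 5
      else if s = "country" then 6 else 7 := by
  have h : pvPriorityIndex = PySem.Dict.mk
      [("common_name", (0:Int)), ("email_address", 1), ("organization", 2),
       ("organizational_unit", 3), ("locality", 4), ("state", 5), ("country", 6)] := by rfl
  rw [h]
  simp only [PySem.Dict.getD_eq_get?_getD, PySem.Dict.get?_mk_cons, beq_iff_eq]
  by_cases h1 : s = "common_name"; · subst h1; rfl
  by_cases h2 : s = "email_address"; · subst h2; rfl
  by_cases h3 : s = "organization"; · subst h3; rfl
  by_cases h4 : s = "organizational_unit"; · subst h4; rfl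
  by_cases h5 : s = "locality"; · subst h5; rfl
  by_cases h6 : s = "state"; · subst h6; rfl
  by_cases h7 : s = "country"; · subst h7; rfl
  simp [PySem.Dict.get?, Ne.symm h1, Ne.symm h2, Ne.symm h3, Ne.symm h4, Ne.symm h5,
    Ne.symm h6, Ne.symm h7, h1, h2, h3, h4, h5, h6, h7]

theorem pv_key_mem (s : String) :
    pvPriorityIndex.getD s 7 ∈ ([0, 1, 2, 3, 4, 5, 6, 7] : List Int) := by
  rw [pv_key_eval]; split_ifs <;> decide

theorem pv_key_field (s f : String) (i : Int)
    (hmem : (f, i) ∈ [("common_name", (0:Int)), ("email_address", 1), ("organization", 2),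
      ("organizational_unit", 3), ("locality", 4), ("state", 5), ("country", 6)]) :
    (pvPriorityIndex.getD s 7 == i) = (s == f) := by
  rw [pv_key_eval]; fin_cases hmem <;> split_ifs <;> simp_all

theorem pv_key_seven (s : String) :
    (pvPriorityIndex.getD s 7 == 7) =
      decide (s ∉ ["common_name", "email_address", "organization", "organizational_unit",
        "locality", "state", "country"]) := by
  rw [pv_key_eval]; split_ifs <;> simp_all

-- with unique keys, the key-f bucket of an association list is the unique entry at f
theorem pv_filter_singleton_of_nodup {ν : Type} (l : List (String × ν)) (f : String) (v : ν)
    (hnd : (l.map Prod.fst).Nodup) (hm : (f, v) ∈ l) :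
    l.filter (fun kv => kv.1 == f) = [(f, v)] := by
  induction l with
  | nil => cases hm
  | cons a t ih =>
    simp only [List.map_cons, List.nodup_cons] at hnd
    rcases List.mem_cons.mp hm with rfl | hmt
    · have ht : t.filter (fun kv => kv.1 == f) = [] := by
        rw [List.filter_eq_nil_iff]
        intro kv hkv
        simp only [beq_iff_eq]
        intro hk
        have hmem : kv.1 ∈ t.map Prod.fst := List.mem_map_of_mem (f := Prod.fst) hkv
        exact hnd.1 (hk ▸ hmem)
      simp [ht]
    · have ha : (a.1 == f) = false := by
        simp only [beq_eq_false_iff_ne, ne_eq]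
        intro hk
        have hf : f ∈ t.map Prod.fst := by
          simpa using List.mem_map_of_mem (f := Prod.fst) hmt
        exact hnd.1 (hk ▸ hf)
      simp [ha, ih hnd.2 hmt]

theorem pv_filter_nil_of_not_mem {ν : Type} (l : List (String × ν)) (f : String)
    (h : f ∉ l.map Prod.fst) :
    l.filter (fun kv => kv.1 == f) = [] := by
  rw [List.filter_eq_nil_iff]
  intro kv hkv
  simp only [beq_iff_eq]
  intro hk
  have hmem : kv.1 ∈ l.map Prod.fst := List.mem_map_of_mem (f := Prod.fst) hkv
  exact h (hk ▸ hmem)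

-- one priority bucket of B equals A's entry for that field
theorem pv_bucket (d : PySem.Dict String String) (hnd : d.keys.Nodup) (f : String) (i : Int)
    (hmem : (f, i) ∈ [("common_name", (0:Int)), ("email_address", 1), ("organization", 2),
      ("organizational_unit", 3), ("locality", 4), ("state", 5), ("country", 6)]) :
    (d.items.filter (fun kv => pvPriorityIndex.getD kv.1 7 == i)).map
        (fun kv => (pvDisplayNames.getD kv.1 kv.1, kv.2)) =
      (match d.get? f with
       | some v => [(pvDisplayNames.getD f f, v)]
       | none => []) := by
  have hnd' : (d.items.map Prod.fst).Nodup := by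
    simpa [PySem.Dict.keys] using hnd
  rw [List.filter_congr (fun kv _ => pv_key_field kv.1 f i hmem)]
  cases hc : d.get? f with
  | none =>
    rw [pv_filter_nil_of_not_mem _ f (by
      simpa [PySem.Dict.keys] using (PySem.Dict.get?_eq_none_iff_not_mem_keys d f).mp hc)]
    rfl
  | some v =>
    rw [pv_filter_singleton_of_nodup _ f v hnd' (PySem.Dict.mem_items_of_get?_eq_some d hc)]
    rfl

-- ===== VERDICT (by name: the statement is the Claim_ definition above) =====
theorem get_formatted_subject_display_spec : Claim_equal_get_formatted_subject_display := by
  intro si _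
  unfold Spec_get_formatted_subject_display
  simp only [get_formatted_subject_display, get_formatted_subject_display_alt]
  set d := PySem.Dict.ofList si with hd
  have hnd : d.keys.Nodup := PySem.Dict.nodup_keys_ofList si
  -- A's first loop is a flatMap over the priority fields
  have hstep : List.foldl (fun acc field =>
      match d.get? field with
      | some v => acc ++ [(pvDisplayNames.getD field field, v)]
      | none => acc) ([] : List (String × String))
      ["common_name", "email_address", "organization", "organizational_unit",
       "locality", "state", "country"]
      = List.flatMap (fun field =>
          match d.get? field with
          | some v => [(pvDisplayNames.getD field field, v)]
          | none => []) 
        ["common_name", "email_address", "organization", "organizational_unit",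
         "locality", "state", "country"] := by
    rw [PySem.List.foldl_congr_mem _ _ (fun acc field => acc ++
        (match d.get? field with
         | some v => [(pvDisplayNames.getD field field, v)]
         | none => [])) _ (by
      intro acc x _
      cases hc : d.get? x <;> simp [hc])]
    rw [PySem.List.foldl_append_eq_flatMap]
    simp
  rw [hstep]
  -- A's second loop appends the non-priority items in order
  rw [PySem.List.foldl_append_ite
    (p := fun kv : String × String => kv.1 ∉
      ["common_name", "email_address", "organization", "organizational_unit",
       "locality", "state", "country"])
    (f := fun kv : String × String => (pvDisplayNames.getD kv.1 kv.1, kv.2))]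
  -- B's stable sort splits into the eight key-buckets
  rw [pv_sorted_eq_flatMap_filter (fun kv : String × String => pvPriorityIndex.getD kv.1 7)
    ([0, 1, 2, 3, 4, 5, 6, 7] : List Int) (by decide) d.items (fun a _ => pv_key_mem a.1)]
  simp only [List.flatMap_cons, List.flatMap_nil, List.map_append, List.append_nil,
    List.append_assoc]
  rw [pv_bucket d hnd "common_name" 0 (by simp),
      pv_bucket d hnd "email_address" 1 (by simp),
      pv_bucket d hnd "organization" 2 (by simp),
      pv_bucket d hnd "organizational_unit" 3 (by simp),
      pv_bucket d hnd "locality" 4 (by simp),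
      pv_bucket d hnd "state" 5 (by simp),
      pv_bucket d hnd "country" 6 (by simp)]
  rw [List.filter_congr (fun kv _ => (pv_key_seven kv.1).symm)]
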